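-- pv_equiv track=rewrite | github.com/LagaV/brother_ql_web | app/labeldesigner/routes.py | find_safe_cut_y_rows
-- ===== SOURCE A (Python) =====
-- from typing import Dict, List, Optional, Tuple
--
-- def find_safe_cut_y_rows(row_blank: List[bool], approx_y: int, window_px: int, min_blank_run: int) -> int:
--     h = len(row_blank)
--     if h == 0:
--         return approx_y
--     approx_y = max(0, min(approx_y, h - 1))
--     window_px = max(0, window_px)
--     min_blank_run = max(1, min_blank_run)
--
--     top = max(0, approx_y - window_px)
--     y = approx_y
--     while y >= top:
--         y0 = y - (min_blank_run // 2)
--         y1 = y0 + min_blank_run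
--         if y0 >= 0 and y1 <= h and all(row_blank[k] for k in range(y0, y1)):
--             return y1
--         y -= 1
--
--     bot = min(h, approx_y + window_px)
--     y = approx_y
--     while y < bot:
--         y0 = y - (min_blank_run // 2)
--         y1 = y0 + min_blank_run
--         if y0 >= 0 and y1 <= h and all(row_blank[k] for k in range(y0, y1)):
--             return y0
--         y += 1
--
--     return approx_y
-- ===== SOURCE B (Python) =====
-- from typing import List
--
-- def find_safe_cut_y_rows(row_blank: List[bool], approx_y: int, window_px: int, min_blank_run: int) -> int:
--     h = len(row_blank)
--     if h == 0:
--         return approx_y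
--     ay = max(0, min(approx_y, h - 1))
--     wp = max(0, window_px)
--     mbr = max(1, min_blank_run)
--
--     # run[i] = length of the consecutive blank run starting at row i (run[h] = 0)
--     run = [0] * (h + 1)
--     for i in range(h - 1, -1, -1):
--         run[i] = run[i + 1] + 1 if row_blank[i] else 0
--
--     half = mbr // 2
--
--     def ok(y):
--         y0 = y - half
--         return y0 >= 0 and y0 + mbr <= h and run[y0] >= mbr
--
--     top = max(0, ay - wp)
--     y = next((y for y in range(ay, top - 1, -1) if ok(y)), None)
--     if y is not None:
--         return y - half + mbr
--
--     bot = min(h, ay + wp)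
--     y = next((y for y in range(ay, bot) if ok(y)), None)
--     if y is not None:
--         return y - half
--     return ay
-- ===== Notes on version B (the rewrite author's own statement) =====
-- stated objective: alternative
-- what changed: B precomputes in one backward pass a run-length array (length of the blank run starting at each row), so each candidate window is a single O(1) array comparison, and the two while-loops become first-match searches (next over a range) instead of rescanning up to min_blank_run rows per candidate; intended as asymptotically cheaper per candidate, but a timing run did not consistently confirm a speed-up.
import Mathlib
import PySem

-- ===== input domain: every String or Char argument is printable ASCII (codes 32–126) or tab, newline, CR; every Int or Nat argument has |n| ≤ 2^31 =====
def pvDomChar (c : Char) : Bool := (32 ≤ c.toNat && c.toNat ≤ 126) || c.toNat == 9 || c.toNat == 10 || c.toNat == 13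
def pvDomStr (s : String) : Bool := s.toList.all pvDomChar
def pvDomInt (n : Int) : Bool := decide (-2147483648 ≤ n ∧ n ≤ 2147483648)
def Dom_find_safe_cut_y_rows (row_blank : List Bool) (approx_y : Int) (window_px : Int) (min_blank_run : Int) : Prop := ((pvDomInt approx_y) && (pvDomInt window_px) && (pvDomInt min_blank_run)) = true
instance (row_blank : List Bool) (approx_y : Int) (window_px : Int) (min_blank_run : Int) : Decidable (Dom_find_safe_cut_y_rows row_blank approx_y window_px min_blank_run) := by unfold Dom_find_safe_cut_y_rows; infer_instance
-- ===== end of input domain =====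

-- B precomputes a run-length array of consecutive blank rows in one backward pass and
-- replaces A's per-candidate window rescan by a single array comparison, turning the
-- while-loops into first-match searches over ranges (objective: alternative algorithm).

-- ===== PORT A =====

-- all(row_blank[k] for k in range(y0, y1)); only evaluated under the guard 0 ≤ y0 ∧ y1 ≤ h,
-- where every index is in range (getD never takes its default there)
def pvAAll (rb : List Bool) (y0 y1 : Int) : Bool :=
  (PySem.List.pyRange y0 y1 1).all (fun k => (PySem.List.pyGet? rb k).getD false)

def pvACheck (rb : List Bool) (h y0 y1 : Int) : Bool :=
  decide (y0 ≥ 0) && decide (y1 ≤ h) && pvAAll rb y0 y1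

-- the first while loop (y from approx_y down to top)
def pvALoopDown (rb : List Bool) (h top mbr y : Int) : Option Int :=
  if hy : y ≥ top then
    let y0 := y - PySem.Int.floordiv mbr 2
    let y1 := y0 + mbr
    if pvACheck rb h y0 y1 then some y1 else pvALoopDown rb h top mbr (y - 1)
  else none
termination_by (y - top + 1).toNat
decreasing_by omega

-- the second while loop (y from approx_y up to bot - 1)
def pvALoopUp (rb : List Bool) (h bot mbr y : Int) : Option Int :=
  if hy : y < bot then
    let y0 := y - PySem.Int.floordiv mbr 2
    let y1 := y0 + mbr
    if pvACheck rb h y0 y1 then some y0 else pvALoopUp rb h bot mbr (y + 1)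
  else none
termination_by (bot - y).toNat
decreasing_by omega

def find_safe_cut_y_rows (row_blank : List Bool) (approx_y : Int) (window_px : Int) (min_blank_run : Int) : Int :=
  let h : Int := row_blank.length
  if h = 0 then approx_y
  else
    let ay := max 0 (min approx_y (h - 1))
    let wp := max 0 window_px
    let mbr := max 1 min_blank_run
    let top := max 0 (ay - wp)
    match pvALoopDown row_blank h top mbr ay with
    | some r => r
    | none =>
      let bot := min h (ay + wp)
      match pvALoopUp row_blank h bot mbr ay with
      | some r => r
      | none => ay

-- ===== PORT B =====

-- run[i] = length of the blank run starting at i; built backwards from run[h] = 0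
-- (Python's backward index loop is this right fold: each step prepends run[i] computed
-- from the previously built run[i+1], the head of the accumulator)
def pvRun (rb : List Bool) : List Int :=
  rb.foldr (fun b acc => (if b then acc.headD 0 + 1 else 0) :: acc) [0]

-- ok(y): y0 >= 0 and y0 + mbr <= h and run[y0] >= mbr
def pvOk (run : List Int) (h mbr half y : Int) : Bool :=
  decide (y - half ≥ 0) && decide (y - half + mbr ≤ h) &&
    decide ((PySem.List.pyGet? run (y - half)).getD 0 ≥ mbr)

def find_safe_cut_y_rows_alt (row_blank : List Bool) (approx_y : Int) (window_px : Int) (min_blank_run : Int) : Int :=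
  let h : Int := row_blank.length
  if h = 0 then approx_y
  else
    let ay := max 0 (min approx_y (h - 1))
    let wp := max 0 window_px
    let mbr := max 1 min_blank_run
    let run := pvRun row_blank
    let half := PySem.Int.floordiv mbr 2
    let top := max 0 (ay - wp)
    match (PySem.List.pyRange ay (top - 1) (-1)).find? (pvOk run h mbr half) with
    | some y => y - half + mbr
    | none =>
      let bot := min h (ay + wp)
      match (PySem.List.pyRange ay bot 1).find? (pvOk run h mbr half) with
      | some y => y - half
      | none => ay

-- ===== PRECONDITION & SPEC =====
def Spec_find_safe_cut_y_rows (row_blank : List Bool) (approx_y : Int) (window_px : Int) (min_blank_run : Int) (out : Int) : Prop := out = find_safe_cut_y_rows_alt row_blank approx_y window_px min_blank_run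
instance (row_blank : List Bool) (approx_y : Int) (window_px : Int) (min_blank_run : Int) (out : Int) : Decidable (Spec_find_safe_cut_y_rows row_blank approx_y window_px min_blank_run out) := by unfold Spec_find_safe_cut_y_rows; infer_instance

-- ===== CLAIM =====
def Claim_equal_find_safe_cut_y_rows : Prop := ∀ (row_blank : List Bool) (approx_y : Int) (window_px : Int) (min_blank_run : Int), Dom_find_safe_cut_y_rows row_blank approx_y window_px min_blank_run → Spec_find_safe_cut_y_rows row_blank approx_y window_px min_blank_run (find_safe_cut_y_rows row_blank approx_y window_px min_blank_run)

-- ===== LEMMAS AND PROOFS =====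

-- length of the leading blank run of a list (specification value of pvRun's entries)
def pvRunLen (l : List Bool) : Int :=
  match l with
  | [] => 0
  | b :: t => if b then pvRunLen t + 1 else 0

theorem pvRun_spec (rb : List Bool) :
    pvRun rb = (List.range (rb.length + 1)).map (fun i => pvRunLen (rb.drop i)) := by
  induction rb with
  | nil => simp [pvRun, pvRunLen]
  | cons b t ih =>
    have hstep : pvRun (b :: t) = (if b then (pvRun t).headD 0 + 1 else 0) :: pvRun t := rfl
    have hhead : (((List.range (t.length + 1)).map fun i => pvRunLen (t.drop i)).headD 0)
        = pvRunLen t := by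
      rw [List.range_succ_eq_map]
      simp
    rw [hstep, ih, show (b :: t).length + 1 = (t.length + 1) + 1 from rfl]
    conv_rhs => rw [List.range_succ_eq_map]
    simp only [List.map_cons, List.map_map, List.drop_zero]
    rw [hhead]
    congr 1

theorem pvRunLen_nonneg (l : List Bool) : 0 ≤ pvRunLen l := by
  induction l with
  | nil => simp [pvRunLen]
  | cons b t ih =>
    simp only [pvRunLen]
    split <;> omega

theorem pvRunLen_ge (l : List Bool) (m : Nat) :
    (pvRunLen l ≥ (m : Int)) ↔ (m ≤ l.length ∧ (l.take m).all id = true) := by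
  induction l generalizing m with
  | nil => simp [pvRunLen]
  | cons b t ih =>
    cases m with
    | zero => simpa using pvRunLen_nonneg (b :: t)
    | succ k =>
      simp only [pvRunLen, List.take_succ_cons, List.all_cons, List.length_cons, id]
      by_cases hb : b
      · simp only [hb, if_true, Bool.true_and]
        constructor
        · intro hge
          have hk := (ih k).mp (by push_cast at hge ⊢; omega)
          push_cast at hge ⊢
          exact ⟨by omega, hk.2⟩
        · intro h
          obtain ⟨h1, h2⟩ := h
          have := (ih k).mpr ⟨by push_cast at h1; omega, h2⟩
          push_cast at this ⊢
          omega
      · have hb' : b = false := by simpa using hb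
        simp only [hb', Bool.false_and]
        push_cast
        constructor
        · intro hge
          have := pvRunLen_nonneg t
          omega
        · intro h
          exact absurd h.2 (by simp)

theorem pvAAll_seg (rb : List Bool) (a : Int) (n : Nat) (h0 : 0 ≤ a)
    (hn : a.toNat + n ≤ rb.length) :
    pvAAll rb a (a + n) = ((rb.drop a.toNat).take n).all id := by
  induction n generalizing a with
  | zero =>
    unfold pvAAll
    rw [PySem.List.pyRange_one_eq_nil (by omega)]
    simp
  | succ n ih =>
    unfold pvAAll
    push_cast
    rw [PySem.List.pyRange_one_cons (by omega : a < a + ((n : Int) + 1))]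
    have hlt : a.toNat < rb.length := by omega
    have hdrop : rb.drop a.toNat = rb[a.toNat] :: rb.drop (a.toNat + 1) :=
      List.drop_eq_getElem_cons hlt
    have harg : a + ((n : Int) + 1) = (a + 1) + (n : Int) := by ring
    have hIH := ih (a + 1) (by omega) (by omega)
    unfold pvAAll at hIH
    have htn : (a + 1).toNat = a.toNat + 1 := by omega
    rw [htn] at hIH
    have hget : (PySem.List.pyGet? rb a).getD false = rb[a.toNat] := by
      rw [PySem.List.pyGet?_of_nonneg _ h0]
      simp [List.getElem?_eq_getElem hlt]
    simp only [List.all_cons, harg, hIH, hget, hdrop, List.take_succ_cons, id]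

-- A's window check equals B's O(1) run-length check
-- A's window check equals B's O(1) run-length check
theorem pvCheck_eq (rb : List Bool) (mbr half y : Int) (hm : 1 ≤ mbr) :
    pvACheck rb (rb.length : Int) (y - half) (y - half + mbr)
      = pvOk (pvRun rb) (rb.length : Int) mbr half y := by
  unfold pvACheck pvOk
  set y0 := y - half with hy0
  by_cases hg0 : y0 ≥ 0
  · by_cases hg1 : y0 + mbr ≤ (rb.length : Int)
    · simp only [hg0, hg1, ge_iff_le, decide_true, Bool.true_and]
      have hget : (PySem.List.pyGet? (pvRun rb) y0).getD 0 = pvRunLen (rb.drop y0.toNat) := by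
        rw [pvRun_spec, PySem.List.pyGet?_of_nonneg _ hg0]
        have hk : y0.toNat < rb.length + 1 := by omega
        simp [hk]
      set n := mbr.toNat with hn
      have hmbr : (n : Int) = mbr := by omega
      have harg : y0 + mbr = y0 + (n : Int) := by omega
      rw [harg, pvAAll_seg rb y0 n hg0 (by omega), hget]
      have hlen : n ≤ (rb.drop y0.toNat).length := by
        rw [List.length_drop]; omega
      rw [Bool.eq_iff_iff, decide_eq_true_iff, ← hmbr]
      constructor
      · intro hall
        exact (pvRunLen_ge _ n).mpr ⟨hlen, hall⟩
      · intro hge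
        exact ((pvRunLen_ge _ n).mp hge).2
    · simp [hg1]
  · simp [hg0]

theorem pvLoopDown_eq (rb : List Bool) (top mbr half y : Int) (hm : 1 ≤ mbr)
    (hh : half = PySem.Int.floordiv mbr 2) :
    pvALoopDown rb (rb.length : Int) top mbr y
      = ((PySem.List.pyRange y (top - 1) (-1)).find? (pvOk (pvRun rb) (rb.length : Int) mbr half)).map
          (fun y => y - half + mbr) := by
  generalize hgen : (y - top + 1).toNat = n
  induction n generalizing y with
  | zero =>
    rw [pvALoopDown, PySem.List.pyRange_neg_one_eq_nil (by omega : y ≤ top - 1)]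
    have : ¬ y ≥ top := by omega
    simp [this]
  | succ n ih =>
    rw [pvALoopDown]
    by_cases hy : y ≥ top
    · simp only [hy, dif_pos]
      rw [PySem.List.pyRange_neg_one_cons (by omega : top - 1 < y), List.find?_cons]
      rw [← hh, pvCheck_eq rb mbr half y hm]
      cases hp : pvOk (pvRun rb) (rb.length : Int) mbr half y with
      | true => simp [hh]
      | false => simpa [hp] using ih (y - 1) (by omega)
    · omega

theorem pvLoopUp_eq (rb : List Bool) (bot mbr half y : Int) (hm : 1 ≤ mbr)
    (hh : half = PySem.Int.floordiv mbr 2) :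
    pvALoopUp rb (rb.length : Int) bot mbr y
      = ((PySem.List.pyRange y bot 1).find? (pvOk (pvRun rb) (rb.length : Int) mbr half)).map
          (fun y => y - half) := by
  generalize hgen : (bot - y).toNat = n
  induction n generalizing y with
  | zero =>
    rw [pvALoopUp, PySem.List.pyRange_one_eq_nil (by omega : bot ≤ y)]
    have : ¬ y < bot := by omega
    simp [this]
  | succ n ih =>
    rw [pvALoopUp]
    by_cases hy : y < bot
    · simp only [hy, dif_pos]
      rw [PySem.List.pyRange_one_cons (by omega : y < bot), List.find?_cons]
      rw [← hh, pvCheck_eq rb mbr half y hm]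
      cases hp : pvOk (pvRun rb) (rb.length : Int) mbr half y with
      | true => simp [hh]
      | false => simpa [hp] using ih (y + 1) (by omega)
    · omega

-- ===== VERDICT =====
theorem find_safe_cut_y_rows_spec : Claim_equal_find_safe_cut_y_rows := by
  intro rb ay wp mbr _
  unfold Spec_find_safe_cut_y_rows find_safe_cut_y_rows find_safe_cut_y_rows_alt
  by_cases h0 : (rb.length : Int) = 0
  · simp [h0]
  · simp only [h0, if_false]
    rw [pvLoopDown_eq rb _ _ _ _ (by omega) rfl, pvLoopUp_eq rb _ _ _ _ (by omega) rfl]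
    cases ((PySem.List.pyRange (max 0 (min ay ((rb.length:Int) - 1))) (max 0 (max 0 (min ay ((rb.length:Int) - 1)) - max 0 wp) - 1) (-1)).find? (pvOk (pvRun rb) (rb.length : Int) (max 1 mbr) (PySem.Int.floordiv (max 1 mbr) 2))) with
    | some r => rfl
    | none =>
      simp only [Option.map_none]
      cases ((PySem.List.pyRange (max 0 (min ay ((rb.length:Int) - 1))) (min (rb.length:Int) (max 0 (min ay ((rb.length:Int) - 1)) + max 0 wp)) 1).find? (pvOk (pvRun rb) (rb.length : Int) (max 1 mbr) (PySem.Int.floordiv (max 1 mbr) 2))) with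
      | some r => rfl
      | none => rfl
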